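-- pv_equiv track=rewrite | github.com/Srajal16/Python-Programs | Problems on Number/Factorial-without.py | factorialWithoutMul
-- ===== SOURCE A (Python) =====
-- def factorialWithoutMul(N):
--
-- 	# Variable to store the final factorial
-- 	ans = N
--
-- 	# Outer loop
-- 	i = N - 1
--
-- 	while (i > 0):
-- 		sum = 0
--
-- 		# Inner loop
-- 		for j in range(i):
-- 			sum += ans
--
-- 		ans = sum
-- 		i -= 1
--
-- 	return ans
-- ===== SOURCE B (Python) =====
-- def factorialWithoutMul(N):
--     ans = N
--     i = N - 1
--     while i > 0:
--         # Russian-peasant multiplication: ans * i using only addition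
--         a = ans
--         b = i
--         result = 0
--         while b > 0:
--             if b % 2 == 1:
--                 result += a
--             a += a
--             b //= 2
--         ans = result
--         i -= 1
--     return ans
-- ===== Notes on version B (the rewrite author's own statement) =====
-- stated objective: faster
-- what changed: The inner repeated-addition loop (adding ans i times) is replaced by Russian-peasant (double-and-add) multiplication over the bits of i; the outer descending loop and its guard are unchanged.
import Mathlib
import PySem

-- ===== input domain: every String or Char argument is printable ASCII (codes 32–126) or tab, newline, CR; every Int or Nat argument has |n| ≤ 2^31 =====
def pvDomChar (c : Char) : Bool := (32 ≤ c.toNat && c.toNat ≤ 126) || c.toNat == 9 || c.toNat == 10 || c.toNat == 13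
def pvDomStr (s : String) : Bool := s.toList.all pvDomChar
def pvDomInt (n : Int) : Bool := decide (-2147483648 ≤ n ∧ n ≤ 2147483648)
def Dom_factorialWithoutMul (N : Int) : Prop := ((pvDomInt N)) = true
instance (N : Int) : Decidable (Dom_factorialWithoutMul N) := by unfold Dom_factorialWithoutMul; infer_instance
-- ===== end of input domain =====

-- B replaces the inner repeated-addition loop (ans added i times) by Russian-peasant
-- double-and-add multiplication over the bits of i; the outer descending loop is unchanged.

-- ===== PORT A =====
-- the outer 'while i > 0' loop; the inner 'for j in range(i): sum += ans' is the foldl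
def pvOuterA (i ans : Int) : Int :=
  if _h : i > 0 then
    pvOuterA (i - 1) ((PySem.List.pyRange 0 i 1).foldl (fun s _ => s + ans) 0)
  else ans
termination_by i.toNat
decreasing_by omega

def factorialWithoutMul (N : Int) : Int := pvOuterA (N - 1) N

-- ===== PORT B =====
-- the inner 'while b > 0' double-and-add loop of Source B
def pvPeasant (a b result : Int) : Int :=
  if _h : b > 0 then
    pvPeasant (a + a) (PySem.Int.floordiv b 2)
      (if PySem.Int.mod b 2 = 1 then result + a else result)
  else result
termination_by b.toNat
decreasing_by
  rw [PySem.Int.floordiv_eq_ediv_of_pos (by omega : (0:Int) < 2)]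
  omega

def pvOuterB (i ans : Int) : Int :=
  if _h : i > 0 then
    pvOuterB (i - 1) (pvPeasant ans i 0)
  else ans
termination_by i.toNat
decreasing_by omega

def factorialWithoutMul_alt (N : Int) : Int := pvOuterB (N - 1) N

-- ===== PRECONDITION & SPEC =====
def Spec_factorialWithoutMul (N : Int) (out : Int) : Prop := out = factorialWithoutMul_alt N
instance (N : Int) (out : Int) : Decidable (Spec_factorialWithoutMul N out) := by unfold Spec_factorialWithoutMul; infer_instance

-- ===== CLAIM (what is proved, stated in full; the proofs are below) =====
def Claim_equal_factorialWithoutMul : Prop := ∀ (N : Int), Dom_factorialWithoutMul N → Spec_factorialWithoutMul N (factorialWithoutMul N)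

-- ===== LEMMAS AND PROOFS =====

-- the inner loop of A sums ans, length-many times
theorem pv_foldl_const_add (ans : Int) :
    ∀ (l : List Int) (s : Int), l.foldl (fun s _ => s + ans) s = s + l.length * ans := by
  intro l
  induction l with
  | nil => intro s; simp
  | cons x xs ih =>
    intro s
    simp [List.foldl, ih]
    ring

-- the inner loop of B computes result + a * b (for b ≥ 0)
theorem pv_peasant_eq : ∀ (n : Nat) (a b r : Int), b.toNat = n → 0 ≤ b →
    pvPeasant a b r = r + a * b := by
  intro n
  induction n using Nat.strong_induction_on with
  | _ n ih =>
    intro a b r hn hb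
    by_cases h : b > 0
    · rw [pvPeasant, dif_pos h,
        PySem.Int.floordiv_eq_ediv_of_pos (by omega : (0:Int) < 2),
        PySem.Int.mod_eq_emod_of_pos (by omega : (0:Int) < 2)]
      rw [ih (b / 2).toNat (by omega) (a + a) (b / 2)
        (if b % 2 = 1 then r + a else r) rfl (by omega)]
      have hb2 : b = 2 * (b / 2) + b % 2 := by omega
      rcases Int.emod_two_eq b with h2 | h2 <;> rw [h2] at hb2 <;>
        simp [h2] <;> linear_combination (-a) * hb2
    · rw [pvPeasant, dif_neg h]
      have : b = 0 := by omega
      simp [this]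

-- the two outer loops agree
theorem pv_outer_eq : ∀ (n : Nat) (i ans : Int), i.toNat = n →
    pvOuterA i ans = pvOuterB i ans := by
  intro n
  induction n using Nat.strong_induction_on with
  | _ n ih =>
    intro i ans hn
    rw [pvOuterA, pvOuterB]
    split_ifs with h
    · have hA : (PySem.List.pyRange 0 i 1).foldl (fun s _ => s + ans) 0
          = pvPeasant ans i 0 := by
        rw [pv_foldl_const_add, PySem.List.length_pyRange_one,
          pv_peasant_eq i.toNat ans i 0 rfl (by omega)]
        have : ((i - 0).toNat : Int) = i := by omega
        rw [this]
        ring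
      rw [hA]
      exact ih (i - 1).toNat (by omega) (i - 1) (pvPeasant ans i 0) rfl
    · rfl

-- ===== VERDICT (by name: the statement is the Claim_ definition above) =====
theorem factorialWithoutMul_spec : Claim_equal_factorialWithoutMul := by
  intro N _
  unfold Spec_factorialWithoutMul factorialWithoutMul factorialWithoutMul_alt
  exact pv_outer_eq (N - 1).toNat (N - 1) N rfl
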